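-- pv_equiv track=rewrite | github.com/Vamsi2511999/AI-Music-systems | music_ai/hindustani_multi_model_pipeline.py | phrase_length
-- ===== SOURCE A (Python) =====
-- from typing import DefaultDict, Dict, Iterable, List, Sequence, Tuple
--
-- SWARA_ORDER = ["S", "r", "R", "g", "G", "m", "M", "P", "d", "D", "n", "N"]
--
-- SEP_TOKEN = "<SEP>"
--
-- def phrase_length(tokens: Sequence[str]) -> int:
--     count = 0
--     for token in reversed(tokens):
--         if token == SEP_TOKEN:
--             break
--         if token in SWARA_ORDER:
--             count += 1
--     return count
-- ===== SOURCE B (Python) =====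
-- SWARA_ORDER = ["S", "r", "R", "g", "G", "m", "M", "P", "d", "D", "n", "N"]
--
-- SEP_TOKEN = "<SEP>"
--
--
-- def phrase_length(tokens):
--     toks = list(tokens)
--     try:
--         idx = len(toks) - 1 - toks[::-1].index(SEP_TOKEN)
--         suffix = toks[idx + 1:]
--     except ValueError:
--         suffix = toks
--     return sum(1 for t in suffix if t in SWARA_ORDER)
-- ===== Notes on version B (the rewrite author's own statement) =====
-- stated objective: alternative
-- what changed: B locates the last SEP_TOKEN once (via index on the reversed list), takes the forward suffix after it, and counts swaras there with a generator sum, instead of A's single fused reverse loop with a break.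
import Mathlib
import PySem

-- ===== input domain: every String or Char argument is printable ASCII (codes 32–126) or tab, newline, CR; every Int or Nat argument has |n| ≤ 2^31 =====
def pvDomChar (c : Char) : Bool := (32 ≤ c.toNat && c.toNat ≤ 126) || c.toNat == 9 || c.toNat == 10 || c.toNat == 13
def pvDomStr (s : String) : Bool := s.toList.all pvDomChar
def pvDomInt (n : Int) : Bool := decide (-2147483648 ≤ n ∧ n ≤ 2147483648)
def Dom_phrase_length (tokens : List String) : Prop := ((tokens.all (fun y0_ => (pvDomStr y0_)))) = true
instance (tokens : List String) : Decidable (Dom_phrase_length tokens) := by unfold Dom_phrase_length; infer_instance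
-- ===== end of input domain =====

-- B changes the decomposition: find the last separator, then count swaras in the forward suffix (objective: alternative).

def pvSwaras : List String := ["S", "r", "R", "g", "G", "m", "M", "P", "d", "D", "n", "N"]

-- ===== PORT A =====
-- the fused 'for token in reversed(tokens): break / count += 1' loop, with its accumulator
def pvLoopA (count : Int) : List String → Int
  | [] => count
  | t :: rest =>
    if t = "<SEP>" then count
    else pvLoopA (if t ∈ pvSwaras then count + 1 else count) rest

def phrase_length (tokens : List String) : Int := pvLoopA 0 tokens.reverse

-- ===== PORT B =====
def phrase_length_alt (tokens : List String) : Int :=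
  let rev := (PySem.List.slice? tokens none none (-1)).getD []   -- toks[::-1]; step ≠ 0, always some
  let suffix :=
    match PySem.List.index? rev "<SEP>" with     -- .index raising ValueError ↔ none
    | some i => PySem.List.slice tokens (some ((tokens.length : Int) - 1 - (i : Int) + 1)) none  -- toks[idx+1:]
    | none => tokens
  (suffix.countP (fun t => t ∈ pvSwaras) : Int)  -- sum(1 for t in suffix if t in SWARA_ORDER)

-- ===== PRECONDITION & SPEC =====
def Spec_phrase_length (tokens : List String) (out : Int) : Prop := out = phrase_length_alt tokens
instance (tokens : List String) (out : Int) : Decidable (Spec_phrase_length tokens out) := by unfold Spec_phrase_length; infer_instance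

-- ===== CLAIM (what is proved, stated in full; the proofs are below) =====
def Claim_equal_phrase_length : Prop := ∀ (tokens : List String), Dom_phrase_length tokens → Spec_phrase_length tokens (phrase_length tokens)

-- ===== LEMMAS AND PROOFS =====

-- A's loop counts swaras in the prefix of its (reversed) input up to the first separator
theorem pvLoopA_eq (l : List String) (c : Int) :
    pvLoopA c l = c + ((l.takeWhile (fun t => t ≠ "<SEP>")).countP (fun t => t ∈ pvSwaras) : Int) := by
  induction l generalizing c with
  | nil => simp [pvLoopA]
  | cons t rest ih =>
    by_cases h : t = "<SEP>"
    · simp [pvLoopA, h, List.takeWhile]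
    · simp only [pvLoopA, h, if_false, List.takeWhile_cons, decide_eq_true_eq,
        ne_eq, not_false_eq_true, if_true, ih]
      by_cases hs : t ∈ pvSwaras <;> simp [hs] <;> ring

theorem phrase_length_spec : Claim_equal_phrase_length := by
  intro tokens _
  unfold Spec_phrase_length phrase_length phrase_length_alt
  rw [PySem.List.slice?_none_none_neg_one]
  simp only [Option.getD_some]
  rw [pvLoopA_eq]
  cases hidx : PySem.List.index? tokens.reverse "<SEP>" with
  | none =>
    have hnot : "<SEP>" ∉ tokens.reverse := (PySem.List.index?_eq_none_iff _ _).mp hidx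
    have htw : tokens.reverse.takeWhile (fun t => t ≠ "<SEP>") = tokens.reverse := by
      rw [List.takeWhile_eq_self_iff]
      intro x hx
      simp only [ne_eq, decide_eq_true_eq]
      exact fun he => hnot (he ▸ hx)
    rw [htw]
    simp [List.countP_reverse]
  | some i =>
    obtain ⟨pre, suf, hsplit, hlen, hnmem⟩ := (PySem.List.index?_eq_some_iff _ _ _).mp hidx
    have hlenrev : tokens.length = pre.length + 1 + suf.length := by
      have := congrArg List.length hsplit
      simpa [Nat.add_comm, Nat.add_assoc, Nat.add_left_comm] using this
    -- A's side: takeWhile of pre ++ "<SEP>" :: suf is pre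
    have hpre : pre.takeWhile (fun t => t ≠ "<SEP>") = pre := by
      rw [List.takeWhile_eq_self_iff]
      intro x hx
      simp only [ne_eq, decide_eq_true_eq]
      exact fun he => hnmem (he ▸ hx)
    have htw : tokens.reverse.takeWhile (fun t => t ≠ "<SEP>") = pre := by
      rw [hsplit, List.takeWhile_append, hpre]
      simp
    rw [htw]
    -- B's side: reduce the match, then the slice is a drop of suf.length + 1
    have hred : (match some i with
        | some i => PySem.List.slice tokens (some ((tokens.length : Int) - 1 - (i : Int) + 1)) none
        | none => tokens)
        = PySem.List.slice tokens (some ((tokens.length : Int) - 1 - (i : Int) + 1)) none := rfl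
    rw [hred]
    have hpos : (0 : Int) ≤ (tokens.length : Int) - 1 - (i : Int) + 1 := by omega
    rw [PySem.List.slice_from _ hpos]
    have htonat : ((tokens.length : Int) - 1 - (i : Int) + 1).toNat = suf.length + 1 := by omega
    have hdrop : tokens.drop (suf.length + 1) = pre.reverse := by
      have htok : tokens = (suf.reverse ++ ["<SEP>"]) ++ pre.reverse := by
        have := congrArg List.reverse hsplit
        simpa using this
      have hl : (suf.reverse ++ ["<SEP>"]).length = suf.length + 1 := by simp
      rw [htok, ← hl, List.drop_left]
    rw [htonat, hdrop]
    simp [List.countP_reverse]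

-- ===== VERDICT (by name: the statement is the Claim_ definition above) =====
-- (theorem phrase_length_spec above proves Claim_equal_phrase_length)
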